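-- pv_equiv track=rewrite | github.com/Temirlan200270/AI-Development-Ecosystem | examples/broken_analyzer.py | count_unique_chars_wrong
-- ===== SOURCE A (Python) =====
-- from typing import List
--
-- def count_unique_chars_wrong(lines: List[str]) -> int:
--     # BUG: O(n^2) — для каждой строки заново склеиваем всё содержимое и считаем set
--     total = 0
--     for i in range(len(lines)):
--         blob = ""
--         for j in range(len(lines)):
--             blob += lines[j]
--         total += len(set(blob))
--     return total
-- ===== SOURCE B (Python) =====
-- from typing import List
--
-- def count_unique_chars_wrong(lines: List[str]) -> int:
--     # compute the distinct-char count of the joined content once, multiply by line count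
--     return len(set("".join(lines))) * len(lines)
-- ===== Notes on version B (the rewrite author's own statement) =====
-- stated objective: faster
-- what changed: B joins the lines and counts distinct characters once, then multiplies by the number of lines, instead of rebuilding the joined blob and its set inside a loop over every line.
import Mathlib
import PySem

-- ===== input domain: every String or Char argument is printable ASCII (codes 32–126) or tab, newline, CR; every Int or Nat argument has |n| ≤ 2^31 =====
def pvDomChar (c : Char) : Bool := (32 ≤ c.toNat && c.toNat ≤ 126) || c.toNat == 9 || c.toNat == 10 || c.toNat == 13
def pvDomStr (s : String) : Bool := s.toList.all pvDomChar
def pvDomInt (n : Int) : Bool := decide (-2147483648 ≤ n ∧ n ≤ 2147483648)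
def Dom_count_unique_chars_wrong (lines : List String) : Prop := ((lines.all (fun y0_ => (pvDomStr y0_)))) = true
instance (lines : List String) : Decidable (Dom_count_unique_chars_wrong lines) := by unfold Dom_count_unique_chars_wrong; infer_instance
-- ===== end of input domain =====

-- B computes the distinct-char count of the joined lines once and multiplies by the line count (faster: one pass instead of a rebuild per line).


-- ===== PORT A =====
-- blob (a Python str) is modelled as its character list; len(set(blob)) = PySem.Set.len ∘ PySem.Set.ofList (exact: a count is order-independent)
def count_unique_chars_wrong (lines : List String) : Int :=
  (PySem.List.pyRange 0 (lines.length : Int) 1).foldl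
    (fun total _i =>
      let blob : List Char :=
        (PySem.List.pyRange 0 (lines.length : Int) 1).foldl
          (fun b j => b ++ (PySem.List.pyGetD lines j "").toList) []
      total + (PySem.Set.len (PySem.Set.ofList blob) : Int))
    0

-- ===== PORT B =====
def count_unique_chars_wrong_alt (lines : List String) : Int :=
  (PySem.Set.len (PySem.Set.ofList (PySem.Str.join "" lines).toList) : Int) * (lines.length : Int)

-- ===== PRECONDITION & SPEC =====
def Spec_count_unique_chars_wrong (lines : List String) (out : Int) : Prop := out = count_unique_chars_wrong_alt lines
instance (lines : List String) (out : Int) : Decidable (Spec_count_unique_chars_wrong lines out) := by unfold Spec_count_unique_chars_wrong; infer_instance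

-- ===== CLAIM (what is proved, stated in full; the proofs are below) =====
def Claim_equal_count_unique_chars_wrong : Prop := ∀ (lines : List String), Dom_count_unique_chars_wrong lines → Spec_count_unique_chars_wrong lines (count_unique_chars_wrong lines)

-- ===== LEMMAS AND PROOFS =====

-- the inner loop's blob is the flattening of all lines
lemma blob_eq_join (lines : List String) :
    (PySem.List.pyRange 0 (lines.length : Int) 1).foldl
      (fun (b : List Char) j => b ++ (PySem.List.pyGetD lines j "").toList) []
    = (PySem.Str.join "" lines).toList := by
  rw [PySem.List.foldl_pyRange_zero_pyGetD' lines "" (fun b s => b ++ s.toList) [],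
      PySem.List.foldl_append_eq_flatMap, PySem.Str.toList_join]
  simp only [PySem.Chars.join, List.intercalate, String.toList_empty]
  induction lines with
  | nil => rfl
  | cons x t ih => cases t <;> simp_all

lemma main_eq (lines : List String) :
    count_unique_chars_wrong lines = count_unique_chars_wrong_alt lines := by
  unfold count_unique_chars_wrong count_unique_chars_wrong_alt
  rw [blob_eq_join lines]
  rw [PySem.List.foldl_add _ (fun _ => ((PySem.Set.len (PySem.Set.ofList (PySem.Str.join "" lines).toList)) : Int)) 0,
      PySem.List.sum_map_const_int, PySem.List.length_pyRange_one]
  simp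
  ring

-- ===== VERDICT (by name: the statement is the Claim_ definition above) =====
theorem count_unique_chars_wrong_spec : Claim_equal_count_unique_chars_wrong := by
  intro lines _
  exact main_eq lines
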